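-- pv_equiv track=rewrite | github.com/Ektomorf/report_generator | generators/pdf_report_generator.py | _get_all_unique_keys
-- ===== SOURCE A (Python) =====
-- from typing import Dict, List, Any
--
-- def _get_all_unique_keys(results_data: List[Dict]) -> List[str]:
--     """Get all unique keys from the results data in a consistent order"""
--     if not results_data:
--         return []
--
--     all_keys = set()
--     for entry in results_data:
--         all_keys.update(entry.keys())
--
--     # Remove docstring fields for table display
--     docstring_fields = {'docstring', 'test_description', 'description', 'Docstring', 'Test_Description', 'Description'}
--     all_keys = all_keys - docstring_fields
--
--     # Define preferred order for common keys
--     key_order = [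
--         'Timestamp',
--         'channel', 'frequency', 'enabled', 'gain',
--         'spectrum_frequencies', 'spectrum_amplitudes',
--         'peak_frequency', 'peak_amplitude', 'screenshot_filepath',
--         'socan_command_method', 'socan_command_args', 'socan_command',
--         'parsed_socan_response', 'raw_socan_response',
--         'rf_matrix_command_method', 'rf_matrix_command_args', 'rf_matrix_command',
--         'parsed_rf_matrix_response', 'raw_rf_matrix_response',
--         'keysight_xsan_command_method', 'keysight_xsan_command_args', 'keysight_xsan_command',
--         'frequencies', 'amplitudes',
--     ]
--
--     ordered_keys = []
--     remaining_keys = set(all_keys)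
--
--     # Add keys in preferred order
--     for key in key_order:
--         if key in remaining_keys:
--             ordered_keys.append(key)
--             remaining_keys.remove(key)
--
--     # Add channel-specific keys
--     channel_keys = [k for k in remaining_keys if any(k.startswith(base) for base in ['enabled_', 'frequency_', 'gain_'])]
--     for key in sorted(channel_keys):
--         ordered_keys.append(key)
--         remaining_keys.remove(key)
--
--     # Add remaining keys alphabetically
--     ordered_keys.extend(sorted(remaining_keys))
--     return ordered_keys
-- ===== SOURCE B (Python) =====
-- from typing import Dict, List, Any
--
--
-- def _get_all_unique_keys(results_data: List[Dict]) -> List[str]: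
--     """Get all unique keys from the results data in a consistent order"""
--     docstring_fields = {'docstring', 'test_description', 'description', 'Docstring', 'Test_Description', 'Description'}
--     key_order = [
--         'Timestamp',
--         'channel', 'frequency', 'enabled', 'gain',
--         'spectrum_frequencies', 'spectrum_amplitudes',
--         'peak_frequency', 'peak_amplitude', 'screenshot_filepath',
--         'socan_command_method', 'socan_command_args', 'socan_command',
--         'parsed_socan_response', 'raw_socan_response',
--         'rf_matrix_command_method', 'rf_matrix_command_args', 'rf_matrix_command',
--         'parsed_rf_matrix_response', 'raw_rf_matrix_response',
--         'keysight_xsan_command_method', 'keysight_xsan_command_args', 'keysight_xsan_command',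
--         'frequencies', 'amplitudes',
--     ]
--     rank = {k: i for i, k in enumerate(key_order)}
--
--     all_keys = set()
--     for entry in results_data:
--         all_keys.update(entry.keys())
--
--     def sort_key(k):
--         r = rank.get(k)
--         if r is None:
--             r = 1000 if k.startswith(('enabled_', 'frequency_', 'gain_')) else 2000
--         return (r, k)
--
--     return sorted(all_keys - docstring_fields, key=sort_key)
-- ===== Notes on version B (the rewrite author's own statement) =====
-- stated objective: simpler
-- what changed: Replaces A's three drain-the-set passes (scan key_order removing hits, then collect-and-sort channel-prefixed keys, then sort the rest) by one sorted() call over the key set with a composite sort key (rank, key), where rank is the key_order index from a precomputed dict, or a bucket constant for channel-prefixed resp. remaining keys.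
import Mathlib
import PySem

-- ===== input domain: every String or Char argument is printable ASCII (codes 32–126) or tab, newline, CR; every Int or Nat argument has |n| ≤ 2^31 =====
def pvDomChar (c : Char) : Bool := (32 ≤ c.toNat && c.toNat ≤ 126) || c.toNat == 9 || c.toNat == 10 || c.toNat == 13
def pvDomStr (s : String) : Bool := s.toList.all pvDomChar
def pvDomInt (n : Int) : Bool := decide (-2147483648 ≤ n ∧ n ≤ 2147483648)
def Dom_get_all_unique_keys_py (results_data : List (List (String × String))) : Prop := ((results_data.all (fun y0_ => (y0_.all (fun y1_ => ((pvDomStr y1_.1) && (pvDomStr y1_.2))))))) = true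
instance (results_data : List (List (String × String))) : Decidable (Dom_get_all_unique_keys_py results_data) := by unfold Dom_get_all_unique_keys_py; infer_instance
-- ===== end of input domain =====

-- B replaces A's three drain-the-set passes by a single sorted() with a composite (rank, key) sort key; objective: simpler.

-- ===== PORT A =====
-- shared constants of the module (identical literals in both Pythons)
def pvDocstringFields : PySem.Set String :=
  PySem.Set.ofList ["docstring", "test_description", "description", "Docstring", "Test_Description", "Description"]

def pvKeyOrder : List String :=
  ["Timestamp",
   "channel", "frequency", "enabled", "gain",
   "spectrum_frequencies", "spectrum_amplitudes",
   "peak_frequency", "peak_amplitude", "screenshot_filepath",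
   "socan_command_method", "socan_command_args", "socan_command",
   "parsed_socan_response", "raw_socan_response",
   "rf_matrix_command_method", "rf_matrix_command_args", "rf_matrix_command",
   "parsed_rf_matrix_response", "raw_rf_matrix_response",
   "keysight_xsan_command_method", "keysight_xsan_command_args", "keysight_xsan_command",
   "frequencies", "amplitudes"]

-- any(k.startswith(base) for base in ['enabled_', 'frequency_', 'gain_'])
def pvIsChan (k : String) : Bool :=
  ["enabled_", "frequency_", "gain_"].any (fun b => PySem.Str.startswith k b)

-- the key-collection loop, identical in A and B:
--   all_keys = set(); for entry in results_data: all_keys.update(entry.keys())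
-- (entry.keys() = the keys of the assoc list; set.update dedups, so updating with the raw key list is exact)
def pvCollectKeys (results_data : List (List (String × String))) : PySem.Set String :=
  results_data.foldl (fun s entry => PySem.Set.update s (entry.map Prod.fst)) PySem.Set.empty

-- port of A: guard, collect, subtract docstring fields, then three drain-the-set passes.
-- A's `remaining_keys.remove(key)` is ported as Set.discard: every removed key is in the set by construction,
-- where remove and discard coincide (no KeyError is reachable).
def get_all_unique_keys_py (results_data : List (List (String × String))) : List String :=
  if results_data = [] then []
  else
    let all_keys : PySem.Set String := PySem.Set.diff (pvCollectKeys results_data) pvDocstringFields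
    -- ordered_keys/remaining_keys as the two components of a fold state; remaining_keys = set(all_keys)
    let st := List.foldl
      (fun (s : List String × PySem.Set String) key =>
        if PySem.Set.contains s.2 key then (s.1 ++ [key], PySem.Set.discard s.2 key) else s)
      ([], PySem.Set.ofList all_keys) pvKeyOrder
    -- channel_keys = [k for k in remaining_keys if any(...)]; only consumed through sorted(), so order-safe
    let channel_keys := List.filter (fun k => pvIsChan k) st.2
    let st2 := List.foldl
      (fun (s : List String × PySem.Set String) key => (s.1 ++ [key], PySem.Set.discard s.2 key))
      st (PySem.List.sorted channel_keys (fun x => x) false)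
    st2.1 ++ PySem.List.sorted st2.2 (fun x => x) false

-- ===== PORT B =====
-- rank = {k: i for i, k in enumerate(key_order)}
def pvRankDict : PySem.Dict String Int :=
  List.foldl (fun d p => PySem.Dict.insert d p.2 p.1) PySem.Dict.empty (PySem.List.enumerate pvKeyOrder 0)

-- def sort_key(k): r = rank.get(k); if r is None: r = 1000 if k.startswith(...) else 2000; return (r, k)
def pvRank (k : String) : Int :=
  match PySem.Dict.get? pvRankDict k with
  | some r => r
  | none => if pvIsChan k then 1000 else 2000

-- the tuple (r, k); Python compares tuples lexicographically = Lex order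
def pvSortKey (k : String) : Lex (Int × String) := toLex (pvRank k, k)

def get_all_unique_keys_py_alt (results_data : List (List (String × String))) : List String :=
  PySem.List.sorted (PySem.Set.diff (pvCollectKeys results_data) pvDocstringFields) pvSortKey false

-- ===== PRECONDITION & SPEC =====
def Spec_get_all_unique_keys_py (results_data : List (List (String × String))) (out : List String) : Prop := out = get_all_unique_keys_py_alt results_data
instance (results_data : List (List (String × String))) (out : List String) : Decidable (Spec_get_all_unique_keys_py results_data out) := by unfold Spec_get_all_unique_keys_py; infer_instance

-- ===== CLAIM (what is proved, stated in full; the proofs are below) =====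
def Claim_equal_get_all_unique_keys_py : Prop := ∀ (results_data : List (List (String × String))), Dom_get_all_unique_keys_py results_data → Spec_get_all_unique_keys_py results_data (get_all_unique_keys_py results_data)

-- ===== LEMMAS AND PROOFS =====

theorem pvRank_pairwise : pvKeyOrder.Pairwise (fun a b => pvRank a < pvRank b) := by decide

theorem pvRank_lt_1000 : ∀ k ∈ pvKeyOrder, pvRank k < 1000 := by decide

theorem pvRankDict_keys : pvRankDict.keys = pvKeyOrder := by decide

theorem pvRank_of_not_mem (k : String) (h : k ∉ pvKeyOrder) :
    pvRank k = if pvIsChan k then 1000 else 2000 := by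
  have hnone : PySem.Dict.get? pvRankDict k = none := by
    rw [PySem.Dict.get?_eq_none_iff_not_mem_keys, pvRankDict_keys]; exact h
  simp [pvRank, hnone]

theorem pvSortKey_of_rank_lt {a b : String} (h : pvRank a < pvRank b) :
    pvSortKey a < pvSortKey b :=
  Prod.Lex.toLex_lt_toLex.mpr (Or.inl h)

theorem pvSortKey_of_rank_eq {a b : String} (h : pvRank a = pvRank b) (h2 : a < b) :
    pvSortKey a < pvSortKey b :=
  Prod.Lex.toLex_lt_toLex.mpr (Or.inr ⟨h, h2⟩)

theorem pv_sorted_split (K : PySem.Set String) (hK : K.Nodup) :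
    pvKeyOrder.filter (fun k => PySem.Set.contains K k)
      ++ (PySem.List.sorted ((K.filter (fun x => !pvKeyOrder.contains x)).filter (fun k => pvIsChan k)) (fun x => x) false
      ++ PySem.List.sorted ((K.filter (fun x => !pvKeyOrder.contains x)).filter (fun x => !pvIsChan x)) (fun x => x) false)
    = PySem.List.sorted K pvSortKey false := by
  have hKO : pvKeyOrder.Nodup := by decide
  set R := K.filter (fun x => !pvKeyOrder.contains x) with hRdef
  set P := pvKeyOrder.filter (fun k => PySem.Set.contains K k) with hPdef
  set L2 := R.filter (fun k => pvIsChan k) with hL2def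
  set L3 := R.filter (fun x => !pvIsChan x) with hL3def
  have hRnd : R.Nodup := hK.filter _
  have hPnd : P.Nodup := hKO.filter _
  have hL2nd : L2.Nodup := hRnd.filter _
  have hL3nd : L3.Nodup := hRnd.filter _
  have hmemR : ∀ x ∈ R, x ∈ K ∧ x ∉ pvKeyOrder := by
    intro x hx; rw [hRdef] at hx; simpa using hx
  -- permutation
  have h1 : P.Perm (K.filter (fun x => pvKeyOrder.contains x)) := by
    refine (List.perm_ext_iff_of_nodup hPnd (hK.filter _)).mpr ?_
    intro a
    simp only [hPdef, List.mem_filter]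
    constructor
    · rintro ⟨ha, hc⟩
      refine ⟨by simpa [PySem.Set.contains_iff] using hc, by simpa using ha⟩
    · rintro ⟨ha, hc⟩
      refine ⟨by simpa using hc, by simpa [PySem.Set.contains_iff] using ha⟩
  have h2 : (PySem.List.sorted L2 (fun x => x) false).Perm L2 := PySem.List.sorted_perm _ _ _
  have h3 : (PySem.List.sorted L3 (fun x => x) false).Perm L3 := PySem.List.sorted_perm _ _ _
  have h23 : (L2 ++ L3).Perm R := List.filter_append_perm _ R
  have hKsplit : (K.filter (fun x => pvKeyOrder.contains x) ++ R).Perm K := by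
    rw [hRdef]; exact List.filter_append_perm _ K
  have hperm : (P ++ (PySem.List.sorted L2 (fun x => x) false ++ PySem.List.sorted L3 (fun x => x) false)).Perm K := by
    refine (List.Perm.append h1 ((List.Perm.append h2 h3).trans h23)).trans hKsplit
  -- ranks
  have rkP : ∀ x ∈ P, pvRank x < 1000 := by
    intro x hx
    exact pvRank_lt_1000 x (List.mem_of_mem_filter hx)
  have rk2 : ∀ x ∈ PySem.List.sorted L2 (fun x => x) false, pvRank x = 1000 := by
    intro x hx
    rw [PySem.List.mem_sorted] at hx
    have hxR := List.mem_of_mem_filter hx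
    have hchan : pvIsChan x = true := by
      rw [hL2def] at hx; exact (List.mem_filter.mp hx).2
    rw [pvRank_of_not_mem x (hmemR x hxR).2, if_pos hchan]
  have rk3 : ∀ x ∈ PySem.List.sorted L3 (fun x => x) false, pvRank x = 2000 := by
    intro x hx
    rw [PySem.List.mem_sorted] at hx
    have hxR := List.mem_of_mem_filter hx
    have hchan : pvIsChan x = false := by
      rw [hL3def] at hx
      simpa using (List.mem_filter.mp hx).2
    rw [pvRank_of_not_mem x (hmemR x hxR).2, if_neg (by simp [hchan])]
  -- pairwise
  have pwP : P.Pairwise (fun a b => pvSortKey a < pvSortKey b) :=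
    (pvRank_pairwise.filter _).imp pvSortKey_of_rank_lt
  have pwSorted : ∀ (L : List String), L.Nodup →
      (PySem.List.sorted L (fun x => x) false).Pairwise (fun a b => (a : String) < b) := by
    intro L hL
    have hle := PySem.List.sorted_pairwise L (fun x => x)
    have hnd : (PySem.List.sorted L (fun x => x) false).Nodup :=
      ((PySem.List.sorted_perm L (fun x => x) false).nodup_iff).mpr hL
    exact (hle.and hnd).imp (fun h => lt_of_le_of_ne h.1 h.2)
  have pw2 : (PySem.List.sorted L2 (fun x => x) false).Pairwise (fun a b => pvSortKey a < pvSortKey b) := by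
    refine (pwSorted L2 hL2nd).imp_of_mem ?_
    intro a b ha hb hlt
    exact pvSortKey_of_rank_eq (by rw [rk2 a ha, rk2 b hb]) hlt
  have pw3 : (PySem.List.sorted L3 (fun x => x) false).Pairwise (fun a b => pvSortKey a < pvSortKey b) := by
    refine (pwSorted L3 hL3nd).imp_of_mem ?_
    intro a b ha hb hlt
    exact pvSortKey_of_rank_eq (by rw [rk3 a ha, rk3 b hb]) hlt
  have hpair : (P ++ (PySem.List.sorted L2 (fun x => x) false ++ PySem.List.sorted L3 (fun x => x) false)).Pairwise
      (fun a b => pvSortKey a < pvSortKey b) := by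
    rw [List.pairwise_append]
    refine ⟨pwP, ?_, ?_⟩
    · rw [List.pairwise_append]
      refine ⟨pw2, pw3, ?_⟩
      intro a ha b hb
      exact pvSortKey_of_rank_lt (by rw [rk2 a ha, rk3 b hb]; norm_num)
    · intro a ha b hb
      rcases List.mem_append.mp hb with hb2 | hb3
      · exact pvSortKey_of_rank_lt (by rw [rk2 b hb2]; exact rkP a ha)
      · exact pvSortKey_of_rank_lt (by have := rkP a ha; rw [rk3 b hb3]; omega)
  exact (PySem.List.sorted_eq_of_perm_of_pairwise_lt K _ pvSortKey hperm hpair).symm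


theorem pv_phase1 (ks : List String) :
    ∀ (acc : List String) (K : PySem.Set String), ks.Nodup →
    List.foldl
      (fun (s : List String × PySem.Set String) key =>
        if PySem.Set.contains s.2 key then (s.1 ++ [key], PySem.Set.discard s.2 key) else s)
      (acc, K) ks
    = (acc ++ ks.filter (fun k => PySem.Set.contains K k),
       K.filter (fun x => !ks.contains x)) := by
  induction ks with
  | nil => intro acc K _; simp
  | cons k t ih =>
    intro acc K hnd
    have hkt : k ∉ t := (List.nodup_cons.mp hnd).1
    have ht : t.Nodup := (List.nodup_cons.mp hnd).2
    rw [List.foldl_cons]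
    by_cases hk : PySem.Set.contains K k
    · rw [if_pos hk, ih _ _ ht]
      refine Prod.ext ?_ ?_
      · show (acc ++ [k]) ++ t.filter (fun x => PySem.Set.contains (PySem.Set.discard K k) x)
          = acc ++ (k :: t).filter (fun x => PySem.Set.contains K x)
        rw [List.filter_cons_of_pos hk, List.append_assoc]
        show acc ++ ([k] ++ _) = _
        rw [List.singleton_append]
        congr 2
        refine List.filter_congr ?_
        intro x hx
        have hxk : (x == k) = false := by
          refine beq_eq_false_iff_ne.mpr ?_
          intro hEq; exact hkt (hEq ▸ hx)
        simp [PySem.Set.contains, PySem.Set.discard, hxk]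
      · show (PySem.Set.discard K k).filter (fun x => !t.contains x)
          = K.filter (fun x => !(k :: t).contains x)
        rw [PySem.Set.discard, List.filter_filter]
        refine List.filter_congr ?_
        intro x _
        simp only [List.contains_cons, Bool.not_or]
        rw [Bool.and_comm]
    · rw [if_neg hk, ih _ _ ht]
      refine Prod.ext ?_ ?_
      · show acc ++ t.filter (fun x => PySem.Set.contains K x)
          = acc ++ (k :: t).filter (fun x => PySem.Set.contains K x)
        rw [List.filter_cons_of_neg (by simpa using hk)]
      · show K.filter (fun x => !t.contains x)
          = K.filter (fun x => !(k :: t).contains x)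
        refine List.filter_congr ?_
        intro x hx
        have hxk : (x == k) = false := by
          refine beq_eq_false_iff_ne.mpr ?_
          intro hEq
          apply hk
          simpa [PySem.Set.contains_iff] using (hEq ▸ hx)
        simp only [List.contains_cons, Bool.not_or, hxk, Bool.not_false, Bool.true_and]

theorem pv_phase2 (cs : List String) :
    ∀ (acc : List String) (K : PySem.Set String),
    List.foldl
      (fun (s : List String × PySem.Set String) key => (s.1 ++ [key], PySem.Set.discard s.2 key))
      (acc, K) cs
    = (acc ++ cs, K.filter (fun x => !cs.contains x)) := by
  induction cs with
  | nil => intro acc K; simp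
  | cons c t ih =>
    intro acc K
    rw [List.foldl_cons, ih]
    refine Prod.ext ?_ ?_
    · simp
    · show (PySem.Set.discard K c).filter (fun x => !t.contains x)
        = K.filter (fun x => !(c :: t).contains x)
      rw [PySem.Set.discard, List.filter_filter]
      refine List.filter_congr ?_
      intro x _
      simp only [List.contains_cons, Bool.not_or]
      rw [Bool.and_comm]

theorem pv_nodup_foldl_update (l : List (List (String × String))) :
    ∀ (s : PySem.Set String), s.Nodup →
    (List.foldl (fun s entry => PySem.Set.update s (entry.map Prod.fst)) s l).Nodup := by
  induction l with
  | nil => intro s hs; simpa using hs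
  | cons e t ih =>
    intro s hs
    rw [List.foldl_cons]
    exact ih _ (PySem.Set.nodup_update _ _ hs)

theorem pv_nodup_collect (results_data : List (List (String × String))) :
    (pvCollectKeys results_data).Nodup :=
  pv_nodup_foldl_update results_data _ (by simp [PySem.Set.empty])

-- the heart: A's three passes over a duplicate-free key list K equal one sort by pvSortKey
theorem pv_main (K : PySem.Set String) (hK : K.Nodup) :
    (let st := List.foldl
        (fun (s : List String × PySem.Set String) key =>
          if PySem.Set.contains s.2 key then (s.1 ++ [key], PySem.Set.discard s.2 key) else s)
        ([], PySem.Set.ofList K) pvKeyOrder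
     let channel_keys := List.filter (fun k => pvIsChan k) st.2
     let st2 := List.foldl
        (fun (s : List String × PySem.Set String) key => (s.1 ++ [key], PySem.Set.discard s.2 key))
        st (PySem.List.sorted channel_keys (fun x => x) false)
     st2.1 ++ PySem.List.sorted st2.2 (fun x => x) false)
    = PySem.List.sorted K pvSortKey false := by
  have hKO : pvKeyOrder.Nodup := by decide
  dsimp only
  rw [PySem.Set.ofList_eq_self_of_nodup _ hK, pv_phase1 pvKeyOrder [] K hKO]
  dsimp only
  rw [pv_phase2]
  dsimp only
  rw [List.nil_append]
  -- on the remaining set, membership in the sorted channel list is just the prefix test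
  have hCfix :
      (K.filter (fun x => !pvKeyOrder.contains x)).filter
        (fun x => !(PySem.List.sorted
          (List.filter (fun k => pvIsChan k) (K.filter (fun x => !pvKeyOrder.contains x)))
          (fun x => x) false).contains x)
      = (K.filter (fun x => !pvKeyOrder.contains x)).filter (fun x => !pvIsChan x) := by
    refine List.filter_congr ?_
    intro x hx
    congr 1
    rw [Bool.eq_iff_iff]
    simp only [List.contains_iff_mem, PySem.List.mem_sorted, List.mem_filter]
    have hx' := List.mem_filter.mp hx
    tauto
  rw [hCfix, List.append_assoc]
  exact pv_sorted_split K hK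

-- ===== VERDICT (by name: the statement is the Claim_ definition above) =====
theorem get_all_unique_keys_py_spec : Claim_equal_get_all_unique_keys_py := by
  intro rd _dom
  unfold Spec_get_all_unique_keys_py
  by_cases h : rd = []
  · subst h; decide
  · have hK : (PySem.Set.diff (pvCollectKeys rd) pvDocstringFields).Nodup :=
      PySem.Set.nodup_diff _ _ (pv_nodup_collect rd)
    simp only [get_all_unique_keys_py, get_all_unique_keys_py_alt, if_neg h]
    exact pv_main _ hK
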